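-- pv_equiv track=rewrite | github.com/JelinR/Google_Foobar_Challenge | Google Challenge 5.py | pre_row_div
-- ===== SOURCE A (Python) =====
-- def num_to_bin(n_list):
--     bins = []
--     for elem in n_list:
--         first_bit = tuple(int(x) for x in format(elem[0], '#04b')[2:])
--         second_bit = tuple(int(x) for x in format(elem[1], '#04b')[2:])
--         bins.append([first_bit, second_bit])
--     return bins
--
-- def pre_row_div(row):
--   pres = []
--
--   true_check_cols = [(1, 0), (0, 1), (2, 0), (0, 2)]
--   next_possibs = [(x, y) for x in [0, 1] for y in [0, 1]]
--   false_check_cols = [(x, y) for x in range(4) for y in range(4) if (x, y) not in true_check_cols]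
--
--   true_bins = num_to_bin(true_check_cols)
--   false_bins = num_to_bin(false_check_cols)
--
--   for pos, row_bit in enumerate(row):
--     if pos == 0:
--         if row_bit == 1: pres = true_bins
--         else: pres = false_bins
--         continue
--
--     curr = []
--     for pre_elem in pres:
--       for next_possib in next_possibs:
--         check_set = [pre_elem[-1], next_possib]
--         if check_set in true_bins: next_bit = 1
--         else: next_bit = 0
--
--         if next_bit == row_bit:
--           curr.append(pre_elem + [next_possib])
--     pres = curr
--
--   nums_pres = []
--   for pres_elem in pres:
--     first_num = ''.join([str(x[0]) for x in pres_elem])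
--     second_num = ''.join([str(x[1]) for x in pres_elem])
--     num_set = (int(first_num, 2), int(second_num, 2))
--
--     nums_pres.append(num_set)
--
--   return nums_pres
-- ===== SOURCE B (Python) =====
-- def pre_row_div(row):
--     if not row:
--         return []
--     cols = [(0, 0), (0, 1), (1, 0), (1, 1)]
--     if row[0] == 1:
--         starts = [((0, 1), (0, 0)), ((0, 0), (0, 1)), ((1, 0), (0, 0)), ((0, 0), (1, 0))]
--     else:
--         starts = [(a, b) for a in cols for b in cols
--                   if a[0] + a[1] + b[0] + b[1] != 1]
--
--     def extend(top, bot, last, bits):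
--         # DFS over the remaining columns, carrying the two row numbers as
--         # integer accumulators instead of materialising column sequences.
--         if not bits:
--             return [(top, bot)]
--         out = []
--         for c in cols:
--             if (1 if last[0] + last[1] + c[0] + c[1] == 1 else 0) == bits[0]:
--                 out += extend(top * 2 + c[0], bot * 2 + c[1], c, bits[1:])
--         return out
--
--     res = []
--     for a, b in starts:
--         res += extend(a[0] * 2 + b[0], a[1] * 2 + b[1], b, row[1:])
--     return res
-- ===== Notes on version B (the rewrite author's own statement) =====
-- stated objective: alternative
-- what changed: A keeps a frontier of column-tuple sequences (BFS layer per row bit) and converts each survivor with ''.join/int(,2) at the end; B does a recursive DFS from each valid first column pair, carrying the two output integers as accumulators so no sequences are ever materialised.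
import Mathlib
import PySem

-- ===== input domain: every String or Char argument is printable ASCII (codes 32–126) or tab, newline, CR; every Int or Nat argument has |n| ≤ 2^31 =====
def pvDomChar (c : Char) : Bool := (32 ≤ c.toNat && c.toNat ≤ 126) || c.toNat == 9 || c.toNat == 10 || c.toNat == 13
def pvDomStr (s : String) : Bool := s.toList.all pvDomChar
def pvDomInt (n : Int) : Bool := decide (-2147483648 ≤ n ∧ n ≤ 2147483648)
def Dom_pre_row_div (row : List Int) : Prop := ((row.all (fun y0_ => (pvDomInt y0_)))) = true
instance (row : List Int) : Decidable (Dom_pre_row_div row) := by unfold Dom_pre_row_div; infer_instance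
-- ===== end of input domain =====

-- B replaces A's frontier lists of column tuples (with a final join/int(,2) pass) by a
-- recursive DFS that carries the two output integers as accumulators (objective: alternative).

-- ===== PORT A =====
-- format(n, '#04b')[2:] as a tuple of bit ints; exact for the arguments 0..3 that occur here
def pvBits (n : Int) : Int × Int := (PySem.Int.floordiv n 2, PySem.Int.mod n 2)

def pvNumToBin (n_list : List (Int × Int)) : List (List (Int × Int)) :=
  n_list.foldl (fun bins elem => bins ++ [[pvBits elem.1, pvBits elem.2]]) []

def pvTrueCheckCols : List (Int × Int) := [(1, 0), (0, 1), (2, 0), (0, 2)]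
def pvNextPossibs : List (Int × Int) :=
  ([0, 1] : List Int).flatMap (fun x => ([0, 1] : List Int).flatMap (fun y => [(x, y)]))
def pvFalseCheckCols : List (Int × Int) :=
  (PySem.List.pyRange 0 4 1).flatMap (fun x => (PySem.List.pyRange 0 4 1).flatMap
    (fun y => if (x, y) ∈ pvTrueCheckCols then [] else [(x, y)]))

def pvTrueBins : List (List (Int × Int)) := pvNumToBin pvTrueCheckCols
def pvFalseBins : List (List (Int × Int)) := pvNumToBin pvFalseCheckCols

-- the inner double loop for pos >= 1; pre_elem[-1] via pyGet? (pre_elem is never empty)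
def pvStepA (pres : List (List (Int × Int))) (row_bit : Int) : List (List (Int × Int)) :=
  pres.foldl (fun curr pre_elem =>
    pvNextPossibs.foldl (fun curr next_possib =>
      let check_set := [(PySem.List.pyGet? pre_elem (-1)).getD (0, 0), next_possib]
      let next_bit : Int := if check_set ∈ pvTrueBins then 1 else 0
      if next_bit = row_bit then curr ++ [pre_elem ++ [next_possib]] else curr) curr) []

-- int(''.join(str(x)…), 2): exact because every joined entry is the one-digit bit 0 or 1
def pvBinJoin (bits : List Int) : Int := bits.foldl (fun a b => 2 * a + b) 0

def pre_row_div (row : List Int) : List (Int × Int) :=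
  let pres := (PySem.List.enumerate row).foldl (fun pres pr =>
    if pr.1 = 0 then (if pr.2 = 1 then pvTrueBins else pvFalseBins)
    else pvStepA pres pr.2) []
  pres.foldl (fun nums_pres pres_elem =>
    nums_pres ++ [(pvBinJoin (pres_elem.map Prod.fst), pvBinJoin (pres_elem.map Prod.snd))]) []

-- ===== PORT B =====
def pvCols : List (Int × Int) := [(0, 0), (0, 1), (1, 0), (1, 1)]

def pvExtend (top bot : Int) (last : Int × Int) (bits : List Int) : List (Int × Int) :=
  match bits with
  | [] => [(top, bot)]
  | b :: bs =>
    pvCols.foldl (fun out c =>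
      if (if last.1 + last.2 + c.1 + c.2 = 1 then (1 : Int) else 0) = b
      then out ++ pvExtend (top * 2 + c.1) (bot * 2 + c.2) c bs
      else out) []

def pre_row_div_alt (row : List Int) : List (Int × Int) :=
  match row with
  | [] => []
  | r0 :: rest =>
    let starts : List ((Int × Int) × (Int × Int)) :=
      if r0 = 1 then [((0, 1), (0, 0)), ((0, 0), (0, 1)), ((1, 0), (0, 0)), ((0, 0), (1, 0))]
      else pvCols.flatMap (fun a => pvCols.flatMap (fun b =>
        if a.1 + a.2 + b.1 + b.2 ≠ 1 then [(a, b)] else []))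
    starts.foldl (fun res ab =>
      res ++ pvExtend (ab.1.1 * 2 + ab.2.1) (ab.1.2 * 2 + ab.2.2) ab.2 rest) []

-- ===== PRECONDITION & SPEC =====
def Spec_pre_row_div (row : List Int) (out : List (Int × Int)) : Prop := out = pre_row_div_alt row
instance (row : List Int) (out : List (Int × Int)) : Decidable (Spec_pre_row_div row out) := by unfold Spec_pre_row_div; infer_instance

-- ===== CLAIM (what is proved, stated in full; the proofs are below) =====
def Claim_equal_pre_row_div : Prop := ∀ (row : List Int), Dom_pre_row_div row → Spec_pre_row_div row (pre_row_div row)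

-- ===== LEMMAS AND PROOFS =====

-- proof-side: A's frontier expansion of a single sequence over the remaining bits
def pvExpand (pre : List (Int × Int)) (bits : List Int) : List (List (Int × Int)) :=
  match bits with
  | [] => [pre]
  | b :: bs =>
    pvNextPossibs.flatMap (fun np =>
      if (if [(PySem.List.pyGet? pre (-1)).getD (0, 0), np] ∈ pvTrueBins then (1 : Int) else 0) = b
      then pvExpand (pre ++ [np]) bs else [])

def pvConv (pe : List (Int × Int)) : Int × Int :=
  (pvBinJoin (pe.map Prod.fst), pvBinJoin (pe.map Prod.snd))

theorem pv_flatMap_congr_mem {α β : Type} (l : List α) (f g : α → List β)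
    (h : ∀ x ∈ l, f x = g x) : l.flatMap f = l.flatMap g := by
  induction l with
  | nil => rfl
  | cons a t ih =>
    simp only [List.flatMap_cons, h a (List.mem_cons_self), ih fun x hx => h x (List.mem_cons_of_mem _ hx)]

theorem pv_foldl_ite_append {α β : Type} (l : List α) (p : α → Prop) [DecidablePred p]
    (g : α → List β) (acc : List β) :
    l.foldl (fun out c => if p c then out ++ g c else out) acc =
      acc ++ l.flatMap (fun c => if p c then g c else []) := by
  induction l generalizing acc with
  | nil => simp
  | cons a t ih =>
    rw [List.foldl_cons, List.flatMap_cons, ih]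
    by_cases h : p a <;> simp [h]

theorem pv_stepA_flatMap (pres : List (List (Int × Int))) (b : Int) :
    pvStepA pres b = pres.flatMap (fun pre =>
      pvNextPossibs.flatMap (fun np =>
        if (if [(PySem.List.pyGet? pre (-1)).getD (0, 0), np] ∈ pvTrueBins then (1 : Int) else 0) = b
        then [pre ++ [np]] else [])) := by
  unfold pvStepA
  induction pres using List.reverseRecOn with
  | nil => rfl
  | append_singleton t x ih =>
    rw [List.foldl_append, List.flatMap_append, ← ih]
    simp only [List.foldl_cons, List.foldl_nil, List.flatMap_cons, List.flatMap_nil, List.append_nil]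
    generalize (t.foldl _ []) = acc
    rw [PySem.List.foldl_append_ite (f := fun np => x ++ [np])
      (p := fun np => (if [(PySem.List.pyGet? x (-1)).getD (0, 0), np] ∈ pvTrueBins then (1:Int) else 0) = b)]
    congr 1
    rw [List.flatMap]
    induction pvNextPossibs with
    | nil => rfl
    | cons n t ih2 => by_cases h : (if [(PySem.List.pyGet? x (-1)).getD (0, 0), n] ∈ pvTrueBins then (1:Int) else 0) = b <;>
        simp [h, ih2]

theorem pv_foldl_stepA (bs : List Int) : ∀ (P : List (List (Int × Int))),
    bs.foldl pvStepA P = P.flatMap (fun pre => pvExpand pre bs) := by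
  induction bs with
  | nil => intro P; simp [pvExpand]
  | cons b t ih =>
    intro P
    rw [List.foldl_cons, ih, pv_stepA_flatMap, List.flatMap_assoc]
    refine pv_flatMap_congr_mem _ _ _ fun pre _ => ?_
    rw [List.flatMap_assoc, pvExpand]
    refine pv_flatMap_congr_mem _ _ _ fun np _ => ?_
    by_cases h : (if [(PySem.List.pyGet? pre (-1)).getD (0, 0), np] ∈ pvTrueBins then (1:Int) else 0) = b <;>
      simp [h]

theorem pv_lastD_append (xs : List (Int × Int)) (c : Int × Int) :
    (PySem.List.pyGet? (xs ++ [c]) (-1)).getD (0, 0) = c := by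
  rw [PySem.List.pyGet?_neg_one_append_singleton]; rfl

theorem pv_bit_eq (l np : Int × Int) (hl : l ∈ pvCols) (hnp : np ∈ pvCols) :
    (if [l, np] ∈ pvTrueBins then (1 : Int) else 0) =
    (if l.1 + l.2 + np.1 + np.2 = 1 then (1 : Int) else 0) := by
  fin_cases hl <;> fin_cases hnp <;> decide

theorem pv_binJoin_append (bits : List Int) (c : Int) :
    pvBinJoin (bits ++ [c]) = pvBinJoin bits * 2 + c := by
  unfold pvBinJoin; rw [List.foldl_append]; simp [Int.mul_comm]

theorem pv_expand_extend (bs : List Int) : ∀ (pre : List (Int × Int)), pre ≠ [] →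
    (∀ c ∈ pre, c ∈ pvCols) →
    (pvExpand pre bs).map pvConv =
      pvExtend (pvBinJoin (pre.map Prod.fst)) (pvBinJoin (pre.map Prod.snd))
        ((PySem.List.pyGet? pre (-1)).getD (0, 0)) bs := by
  induction bs with
  | nil => intro pre _ _; simp [pvExpand, pvExtend, pvConv]
  | cons b t ih =>
    intro pre hne hmem
    have hlast : (PySem.List.pyGet? pre (-1)).getD (0, 0) ∈ pvCols := by
      rw [PySem.List.pyGet?_neg_one, List.getLast?_eq_some_getLast hne, Option.getD_some]
      exact hmem _ (List.getLast_mem hne)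
    rw [pvExpand, pvExtend]
    rw [show pvNextPossibs = pvCols from rfl]
    rw [pv_foldl_ite_append (p := fun c =>
      (if ((PySem.List.pyGet? pre (-1)).getD (0, 0)).1 + ((PySem.List.pyGet? pre (-1)).getD (0, 0)).2 + c.1 + c.2 = 1 then (1:Int) else 0) = b)
      (g := fun c => pvExtend (pvBinJoin (pre.map Prod.fst) * 2 + c.1) (pvBinJoin (pre.map Prod.snd) * 2 + c.2) c t)]
    rw [List.map_flatMap, List.nil_append]
    refine pv_flatMap_congr_mem _ _ _ fun np hnp => ?_
    rw [pv_bit_eq _ np hlast hnp]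
    by_cases h : (if ((PySem.List.pyGet? pre (-1)).getD (0, 0)).1 + ((PySem.List.pyGet? pre (-1)).getD (0, 0)).2 + np.1 + np.2 = 1 then (1:Int) else 0) = b
    · rw [if_pos h, if_pos h]
      have hmem' : ∀ c ∈ pre ++ [np], c ∈ pvCols := by
        intro c hc
        rcases List.mem_append.1 hc with h1 | h1
        · exact hmem _ h1
        · rw [List.mem_singleton.1 h1]; exact hnp
      rw [ih (pre ++ [np]) (by simp) hmem', pv_lastD_append]
      simp [pv_binJoin_append]
    · rw [if_neg h, if_neg h, List.map_nil]

theorem pv_enum_fold (bs : List Int) : ∀ (s : Int), 1 ≤ s → ∀ (P : List (List (Int × Int))),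
    (PySem.List.enumerate bs s).foldl (fun pres pr =>
      if pr.1 = 0 then (if pr.2 = 1 then pvTrueBins else pvFalseBins)
      else pvStepA pres pr.2) P = bs.foldl pvStepA P := by
  induction bs with
  | nil => intro s _ P; simp [PySem.List.enumerate_nil]
  | cons b t ih =>
    intro s hs P
    rw [PySem.List.enumerate_cons, List.foldl_cons, List.foldl_cons]
    rw [if_neg (by omega)]
    exact ih (s + 1) (by omega) _

theorem pv_seed (a b : Int × Int) (ha : a ∈ pvCols) (hb : b ∈ pvCols) (rest : List Int) :
    (pvExpand [a, b] rest).map pvConv =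
      pvExtend (a.1 * 2 + b.1) (a.2 * 2 + b.2) b rest := by
  have h := pv_expand_extend rest [a, b] (by simp) (by
    intro c hc
    simp only [List.mem_cons, List.not_mem_nil, or_false] at hc
    rcases hc with rfl | rfl
    · exact ha
    · exact hb)
  rw [h]
  have : (PySem.List.pyGet? [a, b] (-1)).getD (0, 0) = b := pv_lastD_append [a] b
  rw [this]
  congr 1 <;> simp [pvBinJoin, Int.mul_comm]

-- ===== VERDICT (by name: the statement is the Claim_ definition above) =====
theorem pre_row_div_spec : Claim_equal_pre_row_div := by
  intro row _
  unfold Spec_pre_row_div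
  cases row with
  | nil => rfl
  | cons r0 rest =>
    unfold pre_row_div pre_row_div_alt
    show ((PySem.List.enumerate rest 1).foldl
        (fun pres pr => if pr.1 = 0 then (if pr.2 = 1 then pvTrueBins else pvFalseBins) else pvStepA pres pr.2)
        (if r0 = 1 then pvTrueBins else pvFalseBins)).foldl
        (fun nums_pres pres_elem =>
          nums_pres ++ [(pvBinJoin (pres_elem.map Prod.fst), pvBinJoin (pres_elem.map Prod.snd))]) [] =
      (if r0 = 1 then [((0, 1), (0, 0)), ((0, 0), (0, 1)), ((1, 0), (0, 0)), ((0, 0), (1, 0))]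
       else pvCols.flatMap (fun a => pvCols.flatMap (fun b =>
         if a.1 + a.2 + b.1 + b.2 ≠ 1 then [(a, b)] else []))).foldl
        (fun res ab => res ++ pvExtend (ab.1.1 * 2 + ab.2.1) (ab.1.2 * 2 + ab.2.2) ab.2 rest) []
    rw [pv_enum_fold rest 1 le_rfl, pv_foldl_stepA]
    rw [PySem.List.foldl_append_singleton_eq_map
      (f := fun pe : List (Int × Int) => (pvBinJoin (pe.map Prod.fst), pvBinJoin (pe.map Prod.snd))), List.nil_append]
    rw [PySem.List.foldl_append_eq_flatMap
      (g := fun ab : (Int × Int) × (Int × Int) => pvExtend (ab.1.1 * 2 + ab.2.1) (ab.1.2 * 2 + ab.2.2) ab.2 rest), List.nil_append]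
    have hseeds : (if r0 = 1 then pvTrueBins else pvFalseBins) =
        (if r0 = 1 then [((0,1),(0,0)), ((0,0),(0,1)), ((1,0),(0,0)), ((0,0),(1,0))]
         else pvCols.flatMap (fun a => pvCols.flatMap (fun b =>
           if a.1 + a.2 + b.1 + b.2 ≠ 1 then [(a, b)] else []))).map
            (fun ab : (Int × Int) × (Int × Int) => [ab.1, ab.2]) := by
      by_cases h : r0 = 1 <;> simp only [h, if_pos, if_false] <;> decide
    rw [hseeds, List.flatMap_map, List.map_flatMap]
    have hstarts : ∀ ab ∈ (if r0 = 1 then [((0,1),(0,0)), ((0,0),(0,1)), ((1,0),(0,0)), ((0,0),(1,0))]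
         else pvCols.flatMap (fun a => pvCols.flatMap (fun b =>
           if a.1 + a.2 + b.1 + b.2 ≠ 1 then [(a, b)] else []))),
        ab.1 ∈ pvCols ∧ ab.2 ∈ pvCols := by
      by_cases h : r0 = 1 <;> simp only [h, if_false, if_pos] <;> decide
    refine pv_flatMap_congr_mem _ _ _ fun ab hab => ?_
    obtain ⟨ha, hb⟩ := hstarts ab hab
    exact pv_seed ab.1 ab.2 ha hb rest
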